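-- pv_equiv track=rewrite | github.com/Zhany829/CS540--Introduction-to-Artificial-Intelligence | P1/p1_statespace.py | xfer
-- ===== SOURCE A (Python) =====
-- def xfer(state, max, source, dest):
--     ret = [0,0]
--     ret[0] = state[0]
--     ret[1] = state[1]
--     capacityL = max[0]
--     capacityR = max[1]
--     curL = state[0]
--     curR = state[1]
--     if source == 0 and dest == 1:
--         while curL > 0 and curR < capacityR:
--             ret[0] = ret[0] - 1
--             ret[1] = ret[1] + 1
--             curL = curL - 1
--             curR = curR + 1
--     else:
--         while curR > 0 and curL < capacityL:
--             ret[0] = ret[0] + 1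
--             ret[1] = ret[1] - 1
--             curL = curL + 1
--             curR = curR - 1
--     return ret
-- ===== SOURCE B (Python) =====
-- def xfer(state, max, source, dest):
--     if source == 0 and dest == 1:
--         t = min(state[0], max[1] - state[1])
--         if t < 0:
--             t = 0
--         return [state[0] - t, state[1] + t]
--     else:
--         t = min(state[1], max[0] - state[0])
--         if t < 0:
--             t = 0
--         return [state[0] + t, state[1] - t]
-- ===== Notes on version B (the rewrite author's own statement) =====
-- stated objective: simpler
-- what changed: Replaced the unit-by-unit while loops with a closed-form transfer amount min(source amount, remaining destination capacity) clamped at 0, applied with direct arithmetic.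
import Mathlib
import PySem

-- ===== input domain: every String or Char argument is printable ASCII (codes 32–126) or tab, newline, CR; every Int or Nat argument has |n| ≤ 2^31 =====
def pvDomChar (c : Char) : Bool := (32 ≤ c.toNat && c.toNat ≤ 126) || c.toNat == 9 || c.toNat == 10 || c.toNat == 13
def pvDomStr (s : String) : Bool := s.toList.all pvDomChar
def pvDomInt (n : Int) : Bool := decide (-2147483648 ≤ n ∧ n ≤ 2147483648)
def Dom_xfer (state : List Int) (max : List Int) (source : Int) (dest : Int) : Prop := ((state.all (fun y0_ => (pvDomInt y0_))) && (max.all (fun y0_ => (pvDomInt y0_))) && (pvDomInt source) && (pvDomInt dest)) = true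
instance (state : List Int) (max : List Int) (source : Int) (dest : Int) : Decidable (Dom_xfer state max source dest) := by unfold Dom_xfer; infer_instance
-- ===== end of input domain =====

-- ===== PORT A =====
-- B computes the transfer amount in closed form (min of source amount and remaining capacity, clamped at 0) instead of A's unit-by-unit loops: simpler.

-- A's first while loop: move one unit left->right while curL > 0 and curR < capacityR.
def xferLoopLR (retL retR curL curR capR : Int) : List Int :=
  if curL > 0 ∧ curR < capR then
    xferLoopLR (retL - 1) (retR + 1) (curL - 1) (curR + 1) capR
  else [retL, retR]
termination_by (min curL (capR - curR)).toNat
decreasing_by omega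

-- A's second while loop: move one unit right->left while curR > 0 and curL < capacityL.
def xferLoopRL (retL retR curL curR capL : Int) : List Int :=
  if curR > 0 ∧ curL < capL then
    xferLoopRL (retL + 1) (retR - 1) (curL + 1) (curR - 1) capL
  else [retL, retR]
termination_by (min curR (capL - curL)).toNat
decreasing_by omega

def xfer (state : List Int) (max : List Int) (source : Int) (dest : Int) : List Int :=
  let ret0 := (PySem.List.pyGet? state 0).getD 0   -- Pre_ guarantees the index is in range
  let ret1 := (PySem.List.pyGet? state 1).getD 0
  let capacityL := (PySem.List.pyGet? max 0).getD 0
  let capacityR := (PySem.List.pyGet? max 1).getD 0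
  if source == 0 && dest == 1 then
    xferLoopLR ret0 ret1 ret0 ret1 capacityR
  else
    xferLoopRL ret0 ret1 ret0 ret1 capacityL

-- ===== PORT B =====
def xfer_alt (state : List Int) (max : List Int) (source : Int) (dest : Int) : List Int :=
  let s0 := (PySem.List.pyGet? state 0).getD 0
  let s1 := (PySem.List.pyGet? state 1).getD 0
  let m0 := (PySem.List.pyGet? max 0).getD 0
  let m1 := (PySem.List.pyGet? max 1).getD 0
  if source == 0 && dest == 1 then
    let t := Max.max (Min.min s0 (m1 - s1)) 0   -- Source B's min + clamp-below-0
    [s0 - t, s1 + t]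
  else
    let t := Max.max (Min.min s1 (m0 - s0)) 0
    [s0 + t, s1 - t]

-- ===== PRECONDITION & SPEC =====
-- A raises IndexError when state or max has fewer than two elements; exactly those inputs are excluded.
def Pre_xfer (state : List Int) (max : List Int) (source : Int) (dest : Int) : Prop :=
  2 ≤ state.length ∧ 2 ≤ max.length
instance (state : List Int) (max : List Int) (source : Int) (dest : Int) : Decidable (Pre_xfer state max source dest) := by unfold Pre_xfer; infer_instance
def pvWitness_xfer : List Int × List Int × Int × Int := ([1, 2], [3, 4], 0, 1)

def Spec_xfer (state : List Int) (max : List Int) (source : Int) (dest : Int) (out : List Int) : Prop := out = xfer_alt state max source dest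
instance (state : List Int) (max : List Int) (source : Int) (dest : Int) (out : List Int) : Decidable (Spec_xfer state max source dest out) := by unfold Spec_xfer; infer_instance

-- ===== CLAIM (what is proved, stated in full; the proofs are below) =====
def Claim_equal_xfer : Prop := ∀ (state : List Int) (max : List Int) (source : Int) (dest : Int), Dom_xfer state max source dest → Pre_xfer state max source dest → Spec_xfer state max source dest (xfer state max source dest)

-- ===== LEMMAS AND PROOFS =====

theorem xferLoopLR_closed (retL retR curL curR capR : Int) :
    xferLoopLR retL retR curL curR capR =
      [retL - Max.max (Min.min curL (capR - curR)) 0, retR + Max.max (Min.min curL (capR - curR)) 0] := by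
  fun_induction xferLoopLR retL retR curL curR capR with
  | case1 retL retR curL curR h ih =>
      rw [ih]
      simp only [List.cons.injEq, and_true]; constructor <;> omega
  | case2 retL retR curL curR h =>
      have : Max.max (Min.min curL (capR - curR)) 0 = 0 := by omega
      simp [this]

theorem xferLoopRL_closed (retL retR curL curR capL : Int) :
    xferLoopRL retL retR curL curR capL =
      [retL + Max.max (Min.min curR (capL - curL)) 0, retR - Max.max (Min.min curR (capL - curL)) 0] := by
  fun_induction xferLoopRL retL retR curL curR capL with
  | case1 retL retR curL curR h ih =>
      rw [ih]
      simp only [List.cons.injEq, and_true]; constructor <;> omega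
  | case2 retL retR curL curR h =>
      have : Max.max (Min.min curR (capL - curL)) 0 = 0 := by omega
      simp [this]

-- ===== VERDICT (by name: the statement is the Claim_ definition above) =====
theorem xfer_spec : Claim_equal_xfer := by
  intro state max source dest _ _
  unfold Spec_xfer xfer xfer_alt
  split
  · rw [xferLoopLR_closed]
  · rw [xferLoopRL_closed]
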